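-- pv_equiv track=rewrite | github.com/pypi-data/pypi-mirror-80 | packages/rattail-corepos/rattail_corepos-0.1.3.tar.gz/rattail_corepos-0.1.3/rattail_corepos/importing/corepos/api.py | get_person_objects_for_member
-- ===== SOURCE A (Python) =====
-- def get_person_objects_for_member(member):
--     """
--     Return a list of Person data objects for the given Member.  This
--     logic is split out separately so that datasync can leverage it too.
--     """
--     customers = member['customers']
--     people = []
--
--     # make sure account holder is listed first
--     account_holder = None
--     secondary = False
--     mixedup = False
--     for customer in customers:
--         if customer['accountHolder'] and not secondary:
--             account_holder = customer
--         elif not customer['accountHolder']: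
--             secondary = True
--         elif customer['accountHolder'] and secondary:
--             mixedup = True
--     if mixedup:
--         raise NotImplementedError("TODO: should re-sort the customers list for member {}".format(member['cardNo']))
--
--     for i, customer in enumerate(customers, 1):
--         person = dict(customer)
--         person['customer_person_ordinal'] = i
--         people.append(person)
--
--     return people
-- ===== SOURCE B (Python) =====
-- def get_person_objects_for_member(member):
--     customers = member['customers']
--     # account holder(s) must come first: the holder-flag sequence must be monotonically non-increasing
--     flags = [bool(c['accountHolder']) for c in customers]
--     if flags != sorted(flags, reverse=True):
--         raise NotImplementedError("TODO: should re-sort the customers list for member {}".format(member['cardNo']))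
--     return [dict(customer, customer_person_ordinal=i)
--             for i, customer in enumerate(customers, 1)]
-- ===== Notes on version B (the rewrite author's own statement) =====
-- stated objective: simpler
-- what changed: Replaces the stateful three-flag scan (account_holder/secondary/mixedup) with a single derived flag list checked for being non-increasing via sorted(flags, reverse=True), and builds the people list with a comprehension instead of an append loop.
import Mathlib
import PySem

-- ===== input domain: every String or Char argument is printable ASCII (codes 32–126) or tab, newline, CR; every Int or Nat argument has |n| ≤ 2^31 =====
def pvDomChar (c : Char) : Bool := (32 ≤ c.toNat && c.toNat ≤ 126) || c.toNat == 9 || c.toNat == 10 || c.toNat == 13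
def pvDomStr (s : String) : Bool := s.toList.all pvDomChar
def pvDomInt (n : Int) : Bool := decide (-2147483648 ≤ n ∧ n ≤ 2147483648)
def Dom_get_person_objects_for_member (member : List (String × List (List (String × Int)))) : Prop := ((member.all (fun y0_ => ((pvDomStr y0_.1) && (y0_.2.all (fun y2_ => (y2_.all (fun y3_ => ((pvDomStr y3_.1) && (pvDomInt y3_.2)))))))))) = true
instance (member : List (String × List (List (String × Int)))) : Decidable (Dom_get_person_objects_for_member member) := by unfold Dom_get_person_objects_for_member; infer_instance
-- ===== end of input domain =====

-- B replaces A's stateful three-branch scan by a monotonicity check on the derived holder-flag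
-- list and builds the output with a comprehension; objective: simpler. Equality of RETURN values
-- is what is proved (neither program mutates its argument).

-- ===== PORT A =====
-- truthiness of the 'accountHolder' value (an int); Pre_ guarantees the key is present,
-- so the default of getD is never the value used on admitted inputs
def pvHolderFlag (customer : List (String × Int)) : Bool :=
  !((PySem.Dict.mk customer).getD "accountHolder" 0 == 0)

def get_person_objects_for_member (member : List (String × List (List (String × Int)))) : List (List (String × Int)) :=
  match (PySem.Dict.mk member).get? "customers" with
  | none => []          -- Python raises KeyError here; excluded by Pre_
  | some customers =>
    -- state = (account_holder, secondary, mixedup)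
    let st := customers.foldl
      (fun (s : Option (List (String × Int)) × Bool × Bool) customer =>
        if pvHolderFlag customer && !s.2.1 then (some customer, s.2.1, s.2.2)
        else if !(pvHolderFlag customer) then (s.1, true, s.2.2)
        else if pvHolderFlag customer && s.2.1 then (s.1, s.2.1, true)
        else s)
      (none, false, false)
    if st.2.2 then []   -- Python raises NotImplementedError here; excluded by Pre_
    else
      (PySem.List.enumerate customers 1).foldl
        (fun people p => people ++ [((PySem.Dict.mk p.2).insert "customer_person_ordinal" p.1).items]) []

-- ===== PORT B =====
def get_person_objects_for_member_alt (member : List (String × List (List (String × Int)))) : List (List (String × Int)) :=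
  match (PySem.Dict.mk member).get? "customers" with
  | none => []          -- Python raises KeyError here; excluded by Pre_
  | some customers =>
    let flags := customers.map pvHolderFlag
    if flags ≠ PySem.List.sorted flags (fun b => b) true then []  -- Python raises NotImplementedError; excluded by Pre_
    else
      (PySem.List.enumerate customers 1).map
        (fun p => ((PySem.Dict.mk p.2).insert "customer_person_ordinal" p.1).items)

-- ===== PRECONDITION & SPEC =====
-- Pre_ = exactly the inputs where A returns: the 'customers' key exists, every customer has the
-- 'accountHolder' key (else KeyError), and the holder flags are non-increasing (else A raises
-- NotImplementedError, for which it also needs the 'cardNo' key — irrelevant once flags are sorted).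
def Pre_get_person_objects_for_member (member : List (String × List (List (String × Int)))) : Prop :=
  ((PySem.Dict.mk member).get? "customers").isSome = true ∧
  (∀ c ∈ ((PySem.Dict.mk member).get? "customers").getD [], (PySem.Dict.mk c).contains "accountHolder" = true) ∧
  ((((PySem.Dict.mk member).get? "customers").getD []).map pvHolderFlag).Pairwise (fun a b => b ≤ a)
instance (member : List (String × List (List (String × Int)))) : Decidable (Pre_get_person_objects_for_member member) := by unfold Pre_get_person_objects_for_member; infer_instance

def pvWitness_get_person_objects_for_member : (List (String × List (List (String × Int)))) :=
  [("customers", [[("accountHolder", 1)], [("accountHolder", 0), ("x", 3)]]), ("cardNo", [])]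

def Spec_get_person_objects_for_member (member : List (String × List (List (String × Int)))) (out : List (List (String × Int))) : Prop := out = get_person_objects_for_member_alt member
instance (member : List (String × List (List (String × Int)))) (out : List (List (String × Int))) : Decidable (Spec_get_person_objects_for_member member out) := by unfold Spec_get_person_objects_for_member; infer_instance

-- ===== CLAIM (what is proved, stated in full; the proofs are below) =====
def Claim_equal_get_person_objects_for_member : Prop := ∀ (member : List (String × List (List (String × Int)))), Dom_get_person_objects_for_member member → Pre_get_person_objects_for_member member → Spec_get_person_objects_for_member member (get_person_objects_for_member member)

-- ===== LEMMAS AND PROOFS =====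

-- A's scan never sets 'mixedup' when the flag list is non-increasing
-- (strengthened over the running state: once 'secondary' is set, all remaining flags are false)
theorem pv_mixedup_false (customers : List (List (String × Int)))
    (a : Option (List (String × Int))) (sec : Bool)
    (hsec : sec = true → ∀ c ∈ customers, pvHolderFlag c = false)
    (hp : (customers.map pvHolderFlag).Pairwise (fun a b => b ≤ a)) :
    (customers.foldl
      (fun (s : Option (List (String × Int)) × Bool × Bool) customer =>
        if pvHolderFlag customer && !s.2.1 then (some customer, s.2.1, s.2.2)
        else if !(pvHolderFlag customer) then (s.1, true, s.2.2)
        else if pvHolderFlag customer && s.2.1 then (s.1, s.2.1, true)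
        else s)
      (a, sec, false)).2.2 = false := by
  induction customers generalizing a sec with
  | nil => rfl
  | cons c cs ih =>
    simp only [List.map_cons, List.pairwise_cons] at hp
    cases hf : pvHolderFlag c with
    | true =>
      have hsec' : sec = false := by
        by_contra h
        have := hsec (by revert h; cases sec <;> simp) c (by simp)
        simp [hf] at this
      subst hsec'
      simpa [List.foldl_cons, hf] using ih (some c) false (by simp) hp.2
    | false =>
      have hall : ∀ c' ∈ cs, pvHolderFlag c' = false := by
        intro c' hc'
        have := hp.1 (pvHolderFlag c') (List.mem_map_of_mem hc')
        exact le_antisymm (by simpa [hf] using this) (Bool.false_le _)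
      simpa [List.foldl_cons, hf] using ih a true (fun _ => hall) hp.2

-- ===== VERDICT (by name: the statement is the Claim_ definition above) =====
theorem get_person_objects_for_member_spec : Claim_equal_get_person_objects_for_member := by
  intro member _ hpre
  obtain ⟨hsome, _hkeys, hmono⟩ := hpre
  unfold Spec_get_person_objects_for_member
  unfold get_person_objects_for_member get_person_objects_for_member_alt
  cases hco : (PySem.Dict.mk member).get? "customers" with
  | none => rfl
  | some customers =>
    rw [hco] at hmono
    simp only [Option.getD_some] at hmono
    simp only []
    rw [pv_mixedup_false customers none false (by simp) hmono]
    rw [PySem.List.sorted_rev_eq_self_of_pairwise (List.map pvHolderFlag customers) (fun b => b) hmono]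
    simp only [Bool.false_eq_true, if_false, ne_eq, not_true_eq_false]
    simpa using PySem.List.foldl_append_singleton_eq_map
      (fun (p : Int × List (String × Int)) => ((PySem.Dict.mk p.2).insert "customer_person_ordinal" p.1).items)
      (PySem.List.enumerate customers 1) []
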